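-- pv_equiv track=rewrite | github.com/vijaympgs/Olivine-erp-hrm | backend/scripts/generate_erp_menu_items.py | get_view_type_and_config
-- ===== SOURCE A (Python) =====
-- CONFIGS = {
--     'MASTER': 'NESCKVDXRQFIO',
--     'SIMPLE_MASTER': 'NESCKVDXRQF',
--     'TRANSACTION': 'NESCKZTJAVPMRDX1234QF',
--     'REPORT': 'VRXPYQFG',
--     'DASHBOARD': 'VRXQFG',
--     'CONFIGURATION': 'ESCKXR',
--     'LIST': 'NRQFX', # For Folder/List
-- }
--
-- def get_view_type_and_config(label, path, has_children):
--     """Determine View Type"""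
--     if has_children:
--         # It's a Group/Folder
--         return 'LIST', CONFIGS['LIST']
--
--     # For Leaf Nodes
--     l = label.lower()
--     p = path.lower() if path else ''
--
--     # Reports
--     if any(x in l or x in p for x in ['report', 'analysis', 'valuation', 'history', 'log', 'trail', 'aging']):
--         return 'REPORT', CONFIGS['REPORT']
--
--     # Dashboards
--     if 'dashboard' in l or 'overview' in l or 'summary' in l:
--         return 'DASHBOARD', CONFIGS['DASHBOARD']
--
--     # Config
--     if any(x in l or x in p for x in ['config', 'setup', 'parameter', 'rule', 'template', 'mapping', 'matrix']):
--         return 'CONFIGURATION', CONFIGS['CONFIGURATION']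
--
--     # Masters (Enhanced keyword list)
--     if 'master' in l or 'directory' in l or 'profile' in l:
--         return 'MASTER', CONFIGS['MASTER']
--     if any(x in l or x in p for x in ['category', 'brand', 'tax', 'currenc', 'terms', 'bank', 'account', 'uom', 'measure', 'attribute', 'reason', 'code', 'template']):
--         return 'MASTER', CONFIGS['SIMPLE_MASTER']
--
--     # Default
--     return 'TRANSACTION', CONFIGS['TRANSACTION']
-- ===== SOURCE B (Python) =====
-- # Different algorithm: instead of testing rule groups one after another with
-- # early return, flatten all keywords into one table tagged with a priority,
-- # scan it once keeping the minimal priority among ALL matching keywords, and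
-- # look the winner up in a result table.
--
-- _GROUPS = [
--     (0, True, ['report', 'analysis', 'valuation', 'history', 'log', 'trail', 'aging']),
--     (1, False, ['dashboard', 'overview', 'summary']),
--     (2, True, ['config', 'setup', 'parameter', 'rule', 'template', 'mapping', 'matrix']),
--     (3, False, ['master', 'directory', 'profile']),
--     (4, True, ['category', 'brand', 'tax', 'currenc', 'terms', 'bank', 'account', 'uom',
--                'measure', 'attribute', 'reason', 'code', 'template']),
-- ]
--
-- _KEYWORDS = [(kw, prio, use_path) for prio, use_path, kws in _GROUPS for kw in kws]
--
-- _RESULTS = [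
--     ('REPORT', 'VRXPYQFG'),
--     ('DASHBOARD', 'VRXQFG'),
--     ('CONFIGURATION', 'ESCKXR'),
--     ('MASTER', 'NESCKVDXRQFIO'),
--     ('MASTER', 'NESCKVDXRQF'),
--     ('TRANSACTION', 'NESCKZTJAVPMRDX1234QF'),
-- ]
--
--
-- def get_view_type_and_config(label, path, has_children):
--     if has_children:
--         return 'LIST', 'NRQFX'
--     l = label.lower()
--     p = path.lower() if path else ''
--     best = 5
--     for kw, prio, use_path in _KEYWORDS:
--         if kw in l or (use_path and kw in p):
--             best = min(best, prio)
--     return _RESULTS[best]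
-- ===== Notes on version B (the rewrite author's own statement) =====
-- stated objective: alternative
-- what changed: Replaces the early-return chain of per-group keyword tests by a single pass over one flat priority-tagged keyword table that keeps the minimal priority among all matching keywords and indexes a result table with it.
import Mathlib
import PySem

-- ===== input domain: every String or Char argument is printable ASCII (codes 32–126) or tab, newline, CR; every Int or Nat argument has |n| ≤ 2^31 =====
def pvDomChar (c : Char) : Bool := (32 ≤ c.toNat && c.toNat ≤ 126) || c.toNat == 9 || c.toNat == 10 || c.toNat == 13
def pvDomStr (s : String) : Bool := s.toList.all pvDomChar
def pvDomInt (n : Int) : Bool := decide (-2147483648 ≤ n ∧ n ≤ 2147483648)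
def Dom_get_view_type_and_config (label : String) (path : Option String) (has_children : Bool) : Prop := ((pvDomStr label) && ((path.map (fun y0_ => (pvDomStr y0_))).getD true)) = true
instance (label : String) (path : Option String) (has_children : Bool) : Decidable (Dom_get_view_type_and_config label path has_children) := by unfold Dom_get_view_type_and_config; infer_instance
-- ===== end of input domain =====

-- B replaces A's early-return rule chain by one pass over a flat priority-tagged keyword
-- table that keeps the MINIMAL matching priority and indexes a result table (objective: alternative).

-- ===== PORT A =====
def get_view_type_and_config (label : String) (path : Option String) (has_children : Bool) : String × String :=
  if has_children then ("LIST", "NRQFX")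
  else
    let l := PySem.Chars.lower label.toList
    let p := match path with
      | some s => if s.toList.isEmpty then [] else PySem.Chars.lower s.toList
      | none => ([] : List Char)
    if (["report", "analysis", "valuation", "history", "log", "trail", "aging"].map String.toList).any
        (fun x => PySem.Chars.isIn x l || PySem.Chars.isIn x p) then
      ("REPORT", "VRXPYQFG")
    else if PySem.Chars.isIn "dashboard".toList l || PySem.Chars.isIn "overview".toList l || PySem.Chars.isIn "summary".toList l then
      ("DASHBOARD", "VRXQFG")
    else if (["config", "setup", "parameter", "rule", "template", "mapping", "matrix"].map String.toList).any
        (fun x => PySem.Chars.isIn x l || PySem.Chars.isIn x p) then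
      ("CONFIGURATION", "ESCKXR")
    else if PySem.Chars.isIn "master".toList l || PySem.Chars.isIn "directory".toList l || PySem.Chars.isIn "profile".toList l then
      ("MASTER", "NESCKVDXRQFIO")
    else if (["category", "brand", "tax", "currenc", "terms", "bank", "account", "uom", "measure", "attribute", "reason", "code", "template"].map String.toList).any
        (fun x => PySem.Chars.isIn x l || PySem.Chars.isIn x p) then
      ("MASTER", "NESCKVDXRQF")
    else
      ("TRANSACTION", "NESCKZTJAVPMRDX1234QF")

-- ===== PORT B =====
-- the priority groups of Source B: (priority, use_path, keywords)
def pvGroups : List (Nat × Bool × List String) :=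
  [ (0, true, ["report", "analysis", "valuation", "history", "log", "trail", "aging"]),
    (1, false, ["dashboard", "overview", "summary"]),
    (2, true, ["config", "setup", "parameter", "rule", "template", "mapping", "matrix"]),
    (3, false, ["master", "directory", "profile"]),
    (4, true, ["category", "brand", "tax", "currenc", "terms", "bank", "account", "uom", "measure", "attribute", "reason", "code", "template"]) ]

-- Source B's _KEYWORDS: the flattened table (keyword, priority, use_path)
def pvKeywords : List (String × Nat × Bool) :=
  pvGroups.flatMap (fun g => g.2.2.map (fun kw => (kw, g.1, g.2.1)))

-- Source B's _RESULTS, indexed by priority (5 = default)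
def pvResults : List (String × String) :=
  [("REPORT", "VRXPYQFG"), ("DASHBOARD", "VRXQFG"), ("CONFIGURATION", "ESCKXR"),
   ("MASTER", "NESCKVDXRQFIO"), ("MASTER", "NESCKVDXRQF"), ("TRANSACTION", "NESCKZTJAVPMRDX1234QF")]

def get_view_type_and_config_alt (label : String) (path : Option String) (has_children : Bool) : String × String :=
  if has_children then ("LIST", "NRQFX")
  else
    let l := PySem.Chars.lower label.toList
    let p := match path with
      | some s => if s.toList.isEmpty then [] else PySem.Chars.lower s.toList
      | none => ([] : List Char)
    let best := pvKeywords.foldl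
      (fun b e => if PySem.Chars.isIn e.1.toList l || (e.2.2 && PySem.Chars.isIn e.1.toList p) then Nat.min b e.2.1 else b) 5
    -- best is always ≤ 5, so plain getD is exact for Source B's _RESULTS[best]
    pvResults.getD best ("TRANSACTION", "NESCKZTJAVPMRDX1234QF")

-- ===== PRECONDITION & SPEC =====
def Spec_get_view_type_and_config (label : String) (path : Option String) (has_children : Bool) (out : String × String) : Prop := out = get_view_type_and_config_alt label path has_children
instance (label : String) (path : Option String) (has_children : Bool) (out : String × String) : Decidable (Spec_get_view_type_and_config label path has_children out) := by unfold Spec_get_view_type_and_config; infer_instance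

-- ===== CLAIM (what is proved, stated in full; the proofs are below) =====
def Claim_equal_get_view_type_and_config : Prop := ∀ (label : String) (path : Option String) (has_children : Bool), Dom_get_view_type_and_config label path has_children → Spec_get_view_type_and_config label path has_children (get_view_type_and_config label path has_children)

-- ===== LEMMAS AND PROOFS =====

-- the five keyword lists, named for the proofs
def pvK0 : List String := ["report", "analysis", "valuation", "history", "log", "trail", "aging"]
def pvK1 : List String := ["dashboard", "overview", "summary"]
def pvK2 : List String := ["config", "setup", "parameter", "rule", "template", "mapping", "matrix"]
def pvK3 : List String := ["master", "directory", "profile"]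
def pvK4 : List String := ["category", "brand", "tax", "currenc", "terms", "bank", "account", "uom", "measure", "attribute", "reason", "code", "template"]

-- "some keyword of kws occurs in l, or (if f) in p"
def pvCond (l p : List Char) (f : Bool) (kws : List String) : Bool :=
  kws.any (fun kw => PySem.Chars.isIn kw.toList l || (f && PySem.Chars.isIn kw.toList p))

-- folding the min-accumulator over one keyword group of constant priority i and flag f
theorem pv_fold_group (l p : List Char) (i : Nat) (f : Bool) (kws : List String) (b : Nat) :
    (kws.map (fun kw => (kw, i, f))).foldl
        (fun b e => if PySem.Chars.isIn e.1.toList l || (e.2.2 && PySem.Chars.isIn e.1.toList p) then Nat.min b e.2.1 else b) b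
      = if pvCond l p f kws then Nat.min b i else b := by
  induction kws generalizing b with
  | nil => simp [pvCond]
  | cons kw rest ih =>
    simp only [pvCond, List.map, List.foldl, List.any_cons] at ih ⊢
    by_cases h : (PySem.Chars.isIn kw.toList l || (f && PySem.Chars.isIn kw.toList p)) = true
    · simp only [h, if_true, Bool.true_or, ih]
      by_cases h2 : rest.any (fun kw => PySem.Chars.isIn kw.toList l || (f && PySem.Chars.isIn kw.toList p)) = true
      · simp only [h2, if_true, Nat.min_assoc, Nat.min_self]
      · simp only [h2, Bool.false_eq_true, if_false]
    · simp only [Bool.not_eq_true] at h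
      simp only [h, Bool.false_eq_true, if_false, Bool.false_or]
      exact ih b

-- the flat table is the concatenation of its five tagged groups
theorem pv_keywords_eq :
    pvKeywords = (pvK0.map (fun kw => (kw, 0, true))) ++ ((pvK1.map (fun kw => (kw, 1, false))) ++ ((pvK2.map (fun kw => (kw, 2, true))) ++ ((pvK3.map (fun kw => (kw, 3, false))) ++ ((pvK4.map (fun kw => (kw, 4, true))) ++ [])))) := rfl

-- the whole fold over the flat table, written as nested conditional minima
theorem pv_best (l p : List Char) :
    pvKeywords.foldl (fun b e => if PySem.Chars.isIn e.1.toList l || (e.2.2 && PySem.Chars.isIn e.1.toList p) then Nat.min b e.2.1 else b) 5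
      = (if pvCond l p true pvK4 then Nat.min (if pvCond l p false pvK3 then Nat.min (if pvCond l p true pvK2 then Nat.min (if pvCond l p false pvK1 then Nat.min (if pvCond l p true pvK0 then Nat.min 5 0 else 5) 1 else (if pvCond l p true pvK0 then Nat.min 5 0 else 5)) 2 else (if pvCond l p false pvK1 then Nat.min (if pvCond l p true pvK0 then Nat.min 5 0 else 5) 1 else (if pvCond l p true pvK0 then Nat.min 5 0 else 5))) 3 else (if pvCond l p true pvK2 then Nat.min (if pvCond l p false pvK1 then Nat.min (if pvCond l p true pvK0 then Nat.min 5 0 else 5) 1 else (if pvCond l p true pvK0 then Nat.min 5 0 else 5)) 2 else (if pvCond l p false pvK1 then Nat.min (if pvCond l p true pvK0 then Nat.min 5 0 else 5) 1 else (if pvCond l p true pvK0 then Nat.min 5 0 else 5)))) 4 else (if pvCond l p false pvK3 then Nat.min (if pvCond l p true pvK2 then Nat.min (if pvCond l p false pvK1 then Nat.min (if pvCond l p true pvK0 then Nat.min 5 0 else 5) 1 else (if pvCond l p true pvK0 then Nat.min 5 0 else 5)) 2 else (if pvCond l p false pvK1 then Nat.min (if pvCond l p true pvK0 then Nat.min 5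 0 else 5) 1 else (if pvCond l p true pvK0 then Nat.min 5 0 else 5))) 3 else (if pvCond l p true pvK2 then Nat.min (if pvCond l p false pvK1 then Nat.min (if pvCond l p true pvK0 then Nat.min 5 0 else 5) 1 else (if pvCond l p true pvK0 then Nat.min 5 0 else 5)) 2 else (if pvCond l p false pvK1 then Nat.min (if pvCond l p true pvK0 then Nat.min 5 0 else 5) 1 else (if pvCond l p true pvK0 then Nat.min 5 0 else 5))))) := by
  rw [pv_keywords_eq, List.foldl_append, List.foldl_append, List.foldl_append, List.foldl_append,
    List.foldl_append, pv_fold_group, pv_fold_group, pv_fold_group, pv_fold_group, pv_fold_group,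
    List.foldl_nil]

-- the selection over abstract group-match booleans: A's if-chain equals B's min-and-index
theorem pv_select (m0 m1 m2 m3 m4 : Bool) :
    (if m0 then (("REPORT", "VRXPYQFG") : String × String)
     else if m1 then ("DASHBOARD", "VRXQFG")
     else if m2 then ("CONFIGURATION", "ESCKXR")
     else if m3 then ("MASTER", "NESCKVDXRQFIO")
     else if m4 then ("MASTER", "NESCKVDXRQF")
     else ("TRANSACTION", "NESCKZTJAVPMRDX1234QF"))
    = pvResults.getD (if m4 then Nat.min (if m3 then Nat.min (if m2 then Nat.min (if m1 then Nat.min (if m0 then Nat.min 5 0 else 5) 1 else (if m0 then Nat.min 5 0 else 5)) 2 else (if m1 then Nat.min (if m0 then Nat.min 5 0 else 5) 1 else (if m0 then Nat.min 5 0 else 5))) 3 else (if m2 then Nat.min (if m1 then Nat.min (if m0 then Nat.min 5 0 else 5) 1 else (if m0 then Nat.min 5 0 else 5)) 2 else (if m1 then Nat.min (if m0 then Nat.min 5 0 else 5) 1 else (if m0 then Nat.min 5 0 else 5)))) 4 else (if m3 then Nat.min (if m2 then Nat.min (if m1 then Nat.min (if m0 then Nat.min 5 0 else 5) 1 else (if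 m0 then Nat.min 5 0 else 5)) 2 else (if m1 then Nat.min (if m0 then Nat.min 5 0 else 5) 1 else (if m0 then Nat.min 5 0 else 5))) 3 else (if m2 then Nat.min (if m1 then Nat.min (if m0 then Nat.min 5 0 else 5) 1 else (if m0 then Nat.min 5 0 else 5)) 2 else (if m1 then Nat.min (if m0 then Nat.min 5 0 else 5) 1 else (if m0 then Nat.min 5 0 else 5))))) ("TRANSACTION", "NESCKZTJAVPMRDX1234QF") := by
  cases m0 <;> cases m1 <;> cases m2 <;> cases m3 <;> cases m4 <;> rfl

-- ===== VERDICT (by name: the statement is the Claim_ definition above) =====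
theorem get_view_type_and_config_spec : Claim_equal_get_view_type_and_config := by
  intro label path has_children _
  unfold Spec_get_view_type_and_config get_view_type_and_config get_view_type_and_config_alt
  cases has_children with
  | true => rfl
  | false =>
    simp only [Bool.false_eq_true, if_false]
    rw [pv_best]
    simp only [pvCond, pvK0, pvK1, pvK2, pvK3, pvK4, List.map, List.any_cons, List.any_nil,
      Bool.true_and, Bool.false_and, Bool.or_false, Bool.or_assoc]
    exact pv_select _ _ _ _ _
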